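-- pv_equiv track=rewrite | github.com/EL3VT/checkio | Elementary/Remove All Before.py | remove_all_before
-- ===== SOURCE A (Python) =====
-- from collections.abc import Iterable
--
-- def remove_all_before(items: list, border: int) -> Iterable:
--     temp_array = []
--     flag = False
--
--     for i in range(len(items)):
--         if items[i] == border:
--             flag = True
--
--         if flag:
--             temp_array.append(items[i])
--
--     if not (flag):
--         return items
--
--     return temp_array
-- ===== SOURCE B (Python) =====
-- def remove_all_before(items: list, border: int):
--     if border in items:
--         return items[items.index(border):]
--     return items
-- ===== Notes on version B (the rewrite author's own statement) =====
-- stated objective: simpler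
-- what changed: Replaces the index loop with a running flag and conditional appends by a locate-first-then-slice: membership test, then items[items.index(border):], else the original list.
import Mathlib
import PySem

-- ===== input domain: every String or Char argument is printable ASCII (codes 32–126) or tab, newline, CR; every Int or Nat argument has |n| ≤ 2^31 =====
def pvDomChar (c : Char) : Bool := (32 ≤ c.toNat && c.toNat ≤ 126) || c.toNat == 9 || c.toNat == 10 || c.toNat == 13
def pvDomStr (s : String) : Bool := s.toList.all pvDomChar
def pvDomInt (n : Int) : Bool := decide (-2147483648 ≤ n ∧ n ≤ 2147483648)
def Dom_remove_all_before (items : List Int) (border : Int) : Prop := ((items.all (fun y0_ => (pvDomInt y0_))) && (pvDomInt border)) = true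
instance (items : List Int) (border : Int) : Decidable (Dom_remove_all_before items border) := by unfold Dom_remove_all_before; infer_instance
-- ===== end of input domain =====

-- B replaces A's flag-and-append loop by a locate-first-then-slice decomposition (simpler).

-- ===== PORT A =====
-- literal transliteration: loop over range(len(items)) carrying (temp_array, flag);
-- the loop body (set flag on border, conditionally append items[i]) is pvStep
def pvStep (border : Int) (s : List Int × Bool) (x : Int) : List Int × Bool :=
  let flag := if x == border then true else s.2
  if flag then (s.1 ++ [x], flag) else (s.1, flag)

def remove_all_before (items : List Int) (border : Int) : List Int :=
  let st := (PySem.List.pyRange 0 items.length 1).foldl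
    (fun (s : List Int × Bool) i => pvStep border s (PySem.List.pyGetD items i 0))
    ([], false)
  if !st.2 then items else st.1

-- ===== PORT B =====
def remove_all_before_alt (items : List Int) (border : Int) : List Int :=
  if items.contains border then
    match PySem.List.index? items border with
    | some i => PySem.List.slice items (some (i : Int)) none
    | none => items
  else items

-- ===== PRECONDITION & SPEC =====
def Spec_remove_all_before (items : List Int) (border : Int) (out : List Int) : Prop := out = remove_all_before_alt items border
instance (items : List Int) (border : Int) (out : List Int) : Decidable (Spec_remove_all_before items border out) := by unfold Spec_remove_all_before; infer_instance

-- ===== CLAIM (what is proved, stated in full; the proofs are below) =====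
def Claim_equal_remove_all_before : Prop := ∀ (items : List Int) (border : Int), Dom_remove_all_before items border → Spec_remove_all_before items border (remove_all_before items border)

-- ===== LEMMAS AND PROOFS =====

theorem pvFold_of_flag (border : Int) (items acc : List Int) :
    items.foldl (pvStep border) (acc, true) = (acc ++ items, true) := by
  induction items generalizing acc with
  | nil => simp
  | cons x xs ih => simp [pvStep, ih]

theorem pvFold_of_not_mem (border : Int) (items acc : List Int) (h : border ∉ items) :
    items.foldl (pvStep border) (acc, false) = (acc, false) := by
  induction items generalizing acc with
  | nil => rfl
  | cons x xs ih =>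
    simp only [List.mem_cons, not_or] at h
    simp [pvStep, Ne.symm h.1, ih _ h.2]

theorem pvFold_split (border : Int) (pre suf : List Int) (h : border ∉ pre) :
    (pre ++ border :: suf).foldl (pvStep border) ([], false) = (border :: suf, true) := by
  rw [List.foldl_append, pvFold_of_not_mem border pre [] h]
  show (border :: suf).foldl (pvStep border) ([], false) = _
  simp [pvStep, pvFold_of_flag]

theorem remove_all_before_eq_fold (items : List Int) (border : Int) :
    remove_all_before items border =
      (let st := items.foldl (pvStep border) ([], false)
       if !st.2 then items else st.1) := by
  unfold remove_all_before
  rw [PySem.List.foldl_pyRange_zero_pyGetD' items 0 (pvStep border) ([], false)]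

-- ===== VERDICT (by name: the statement is the Claim_ definition above) =====
theorem remove_all_before_spec : Claim_equal_remove_all_before := by
  intro items border _
  unfold Spec_remove_all_before remove_all_before_alt
  rw [remove_all_before_eq_fold]
  by_cases hmem : border ∈ items
  · obtain ⟨k, hk⟩ := (PySem.List.index?_isSome_iff items border).mpr hmem |> Option.isSome_iff_exists.mp
    obtain ⟨pre, suf, heq, hlen, hpre⟩ := (PySem.List.index?_eq_some_iff items border k).mp hk
    subst heq
    rw [pvFold_split border pre suf hpre]
    simp only [hk, List.contains_eq_mem, hmem, decide_true, if_true]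
    rw [PySem.List.slice_from_natCast]
    subst hlen
    simp
  · rw [pvFold_of_not_mem border items [] hmem]
    simp [hmem]
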